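-- pv_equiv track=rewrite | github.com/nonnonno/step2020 | 1_2.py | tennsu
-- ===== SOURCE A (Python) =====
-- def tennsu(word):
--     tennsu=0
--     for i in range(len(word)):
--         if word[i] in ['a', 'b', 'd', 'e', 'g', 'i', 'n', 'o', 'r', 's', 't', 'u']:
--             tennsu+=1
--             if word[i-1] == 'q' and word[i] == 'u':#もしquの入力があったら
--                                                     #uがダブルカウントになってしまうので、得点を1減らす
--                 tennsu -=1
--         elif word[i] in ['c', 'f', 'h', 'l', 'm', 'p', 'v', 'w', 'y']:
--             tennsu+=2
--         else:
--             tennsu+=3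
--     tennsu = (tennsu+1) ** 2
--     return tennsu
-- ===== SOURCE B (Python) =====
-- def tennsu(word):
--     counts = {}
--     for ch in word:
--         counts[ch] = counts.get(ch, 0) + 1
--     base = 0
--     for ch, n in counts.items():
--         if ch in 'abdeginorstu':
--             base += n
--         elif ch in 'cfhlmpvwy':
--             base += 2 * n
--         else:
--             base += 3 * n
--     qu = sum(1 for i in range(len(word)) if word[i] == 'u' and word[i - 1] == 'q')
--     return (base - qu + 1) ** 2
-- ===== Notes on version B (the rewrite author's own statement) =====
-- stated objective: alternative
-- what changed: Replaces A's single positional loop (score per index with an inline qu correction) by a character-frequency dict summed once per distinct letter plus a separate cyclic q-before-u adjacency count subtracted at the end.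
import Mathlib
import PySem

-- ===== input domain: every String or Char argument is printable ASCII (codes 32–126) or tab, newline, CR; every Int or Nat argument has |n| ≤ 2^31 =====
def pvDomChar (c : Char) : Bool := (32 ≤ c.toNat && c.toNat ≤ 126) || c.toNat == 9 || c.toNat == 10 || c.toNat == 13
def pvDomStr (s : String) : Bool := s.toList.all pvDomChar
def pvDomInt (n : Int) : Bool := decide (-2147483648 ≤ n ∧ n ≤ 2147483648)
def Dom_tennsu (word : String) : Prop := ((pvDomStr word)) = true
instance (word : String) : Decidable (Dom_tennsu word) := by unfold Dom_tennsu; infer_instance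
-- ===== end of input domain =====

-- B replaces A's single positional scoring loop by a character-frequency dict summed per distinct
-- letter plus a separate cyclic q-before-u adjacency count (alternative decomposition, same cost).


-- ===== PORT A =====
def tennsu (word : String) : Int :=
  let cs := word.toList
  let t := (PySem.List.pyRange 0 (cs.length : Int) 1).foldl (fun t i =>
    if PySem.List.pyGetD cs i ' ' ∈ ['a','b','d','e','g','i','n','o','r','s','t','u'] then
      -- tennsu += 1; then the qu check subtracts 1 again
      if PySem.List.pyGetD cs (i-1) ' ' = 'q' ∧ PySem.List.pyGetD cs i ' ' = 'u' then t + 1 - 1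
      else t + 1
    else if PySem.List.pyGetD cs i ' ' ∈ ['c','f','h','l','m','p','v','w','y'] then t + 2
    else t + 3) 0
  (t + 1) ^ 2

-- ===== PORT B =====
def tennsu_alt (word : String) : Int :=
  let cs := word.toList
  let counts : PySem.Dict Char Int :=
    cs.foldl (fun d ch => PySem.Dict.insert d ch (PySem.Dict.getD d ch 0 + 1)) PySem.Dict.empty
  let base := (PySem.Dict.items counts).foldl (fun acc p =>
    if p.1 ∈ "abdeginorstu".toList then acc + p.2
    else if p.1 ∈ "cfhlmpvwy".toList then acc + 2 * p.2
    else acc + 3 * p.2) 0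
  let qu : Int := ((PySem.List.pyRange 0 (cs.length : Int) 1).countP
    (fun i => decide (PySem.List.pyGetD cs i ' ' = 'u' ∧ PySem.List.pyGetD cs (i-1) ' ' = 'q')) : Nat)
  (base - qu + 1) ^ 2

-- ===== PRECONDITION & SPEC =====
def Spec_tennsu (word : String) (out : Int) : Prop := out = tennsu_alt word
instance (word : String) (out : Int) : Decidable (Spec_tennsu word out) := by unfold Spec_tennsu; infer_instance

-- ===== CLAIM (what is proved, stated in full; the proofs are below) =====
def Claim_equal_tennsu : Prop := ∀ (word : String), Dom_tennsu word → Spec_tennsu word (tennsu word)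

-- ===== LEMMAS AND PROOFS =====

def pvWgt (c : Char) : Int :=
  if c ∈ ['a','b','d','e','g','i','n','o','r','s','t','u'] then 1
  else if c ∈ ['c','f','h','l','m','p','v','w','y'] then 2
  else 3

-- sum over a nodup list of a single-spike function
lemma pv_sum_spike (v : Char → Int) (c : Char) :
    ∀ (s : List Char), s.Nodup → c ∈ s →
      (s.map (fun k => if k = c then v k else 0)).sum = v c := by
  intro s
  induction s with
  | nil => intro _ h; cases h
  | cons a s ih =>
    intro hnd hm
    simp only [List.nodup_cons] at hnd
    rcases List.mem_cons.mp hm with rfl | hm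
    · simp only [List.map_cons, List.sum_cons]
      have : (s.map (fun k => if k = c then v k else 0)).sum = 0 := by
        apply List.sum_eq_zero; intro x hx
        rcases List.mem_map.mp hx with ⟨k, hk, rfl⟩
        have : k ≠ c := fun h => hnd.1 (h ▸ hk)
        simp [this]
      simp [this]
    · have hac : a ≠ c := fun h => hnd.1 (h ▸ hm)
      simp only [List.map_cons, List.sum_cons, if_neg hac]
      rw [ih hnd.2 hm]; ring

-- weighted count sum over any nodup superset of the support equals the direct weight sum
lemma pv_count_sum (s : List Char) (hnd : s.Nodup) :
    ∀ (cs : List Char), (∀ c ∈ cs, c ∈ s) →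
      (s.map (fun k => (cs.count k : Int) * pvWgt k)).sum = (cs.map pvWgt).sum := by
  intro cs
  induction cs with
  | nil => intro _; simp
  | cons c cs ih =>
    intro hsub
    have hc : c ∈ s := hsub c (List.mem_cons_self)
    have hsub' : ∀ x ∈ cs, x ∈ s := fun x hx => hsub x (List.mem_cons_of_mem _ hx)
    have hstep : ∀ k, ((List.count k (c :: cs) : Int) * pvWgt k)
        = (List.count k cs : Int) * pvWgt k + (if k = c then pvWgt k else 0) := by
      intro k
      by_cases h : k = c
      · subst h; simp [List.count_cons_self]; ring
      · simp [List.count_cons, h]; left; exact fun hh => h hh.symm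
    calc (s.map (fun k => ((c :: cs).count k : Int) * pvWgt k)).sum
        = (s.map (fun k => (cs.count k : Int) * pvWgt k
            + (if k = c then pvWgt k else 0))).sum := by
          congr 1; exact List.map_congr_left (fun k _ => hstep k)
      _ = (s.map (fun k => (cs.count k : Int) * pvWgt k)).sum
            + (s.map (fun k => if k = c then pvWgt k else 0)).sum := by
          rw [← List.sum_map_add]
      _ = (cs.map pvWgt).sum + pvWgt c := by
          rw [ih hsub', pv_sum_spike pvWgt c s hnd hc]
      _ = ((c :: cs).map pvWgt).sum := by simp [List.map_cons]; ring

lemma pv_A_fold (cs : List Char) :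
    (PySem.List.pyRange 0 (cs.length : Int) 1).foldl (fun t i =>
      if PySem.List.pyGetD cs i ' ' ∈ ['a','b','d','e','g','i','n','o','r','s','t','u'] then
        if PySem.List.pyGetD cs (i-1) ' ' = 'q' ∧ PySem.List.pyGetD cs i ' ' = 'u' then t + 1 - 1
        else t + 1
      else if PySem.List.pyGetD cs i ' ' ∈ ['c','f','h','l','m','p','v','w','y'] then t + 2
      else t + 3) 0
    = (cs.map pvWgt).sum
      - ((PySem.List.pyRange 0 (cs.length : Int) 1).countP
          (fun i => decide (PySem.List.pyGetD cs (i-1) ' ' = 'q' ∧ PySem.List.pyGetD cs i ' ' = 'u')) : Nat) := by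
  have hstep : (fun (t i : Int) =>
      if PySem.List.pyGetD cs i ' ' ∈ ['a','b','d','e','g','i','n','o','r','s','t','u'] then
        if PySem.List.pyGetD cs (i-1) ' ' = 'q' ∧ PySem.List.pyGetD cs i ' ' = 'u' then t + 1 - 1
        else t + 1
      else if PySem.List.pyGetD cs i ' ' ∈ ['c','f','h','l','m','p','v','w','y'] then t + 2
      else t + 3)
      = (fun (t i : Int) => t + (pvWgt (PySem.List.pyGetD cs i ' ')
          + -(if (fun j => decide (PySem.List.pyGetD cs (j-1) ' ' = 'q' ∧ PySem.List.pyGetD cs j ' ' = 'u')) i = true then (1:Int) else 0))) := by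
    funext t i
    by_cases h2 : PySem.List.pyGetD cs (i-1) ' ' = 'q' ∧ PySem.List.pyGetD cs i ' ' = 'u'
    · have h1 : PySem.List.pyGetD cs i ' ' ∈ ['a','b','d','e','g','i','n','o','r','s','t','u'] := by
        rw [h2.2]; decide
      simp [pvWgt, h2]
    · by_cases h1 : PySem.List.pyGetD cs i ' ' ∈ ['a','b','d','e','g','i','n','o','r','s','t','u']
      · simp [pvWgt, h1, h2]
      · by_cases h3 : PySem.List.pyGetD cs i ' ' ∈ ['c','f','h','l','m','p','v','w','y'] <;>
          simp [pvWgt, h1, h2, h3]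
  rw [hstep, PySem.List.foldl_add, PySem.List.sum_map_add_int]
  have hneg : (List.map (fun i => -(if (fun j => decide (PySem.List.pyGetD cs (j-1) ' ' = 'q' ∧ PySem.List.pyGetD cs j ' ' = 'u')) i = true then (1:Int) else 0)) (PySem.List.pyRange 0 (cs.length : Int) 1)).sum
      = -((List.map (fun i => (if (fun j => decide (PySem.List.pyGetD cs (j-1) ' ' = 'q' ∧ PySem.List.pyGetD cs j ' ' = 'u')) i = true then (1:Int) else 0)) (PySem.List.pyRange 0 (cs.length : Int) 1)).sum) := by
    rw [show (fun i => -(if (fun j => decide (PySem.List.pyGetD cs (j-1) ' ' = 'q' ∧ PySem.List.pyGetD cs j ' ' = 'u')) i = true then (1:Int) else 0)) = (Neg.neg ∘ (fun i => (if (fun j => decide (PySem.List.pyGetD cs (j-1) ' ' = 'q' ∧ PySem.List.pyGetD cs j ' ' = 'u')) i = true then (1:Int) else 0))) from rfl, ← List.map_map]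
    exact (List.sum_neg (List.map (fun i => (if (fun j => decide (PySem.List.pyGetD cs (j-1) ' ' = 'q' ∧ PySem.List.pyGetD cs j ' ' = 'u')) i = true then (1:Int) else 0)) (PySem.List.pyRange 0 (cs.length : Int) 1))).symm
  rw [hneg, PySem.List.sum_map_ite_one_zero]
  have hw : (List.map (fun i => pvWgt (PySem.List.pyGetD cs i ' ')) (PySem.List.pyRange 0 (cs.length : Int) 1)).sum = (cs.map pvWgt).sum := by
    rw [show (fun i => pvWgt (PySem.List.pyGetD cs i ' ')) = pvWgt ∘ (fun i => PySem.List.pyGetD cs i ' ') from rfl,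
        ← List.map_map, PySem.List.map_pyGetD_pyRange_zero']
  rw [hw]; ring

-- ===== VERDICT (by name: the statement is the Claim_ definition above) =====
theorem tennsu_spec : Claim_equal_tennsu := by
  intro word _
  unfold Spec_tennsu tennsu tennsu_alt
  set cs := word.toList with hcs
  simp only []
  rw [pv_A_fold cs, PySem.Dict.foldl_insert_getD_add_one_eq_counter, PySem.Dict.items_counter]
  have hstep2 : (fun (acc : Int) (p : Char × Int) =>
      if p.1 ∈ "abdeginorstu".toList then acc + p.2
      else if p.1 ∈ "cfhlmpvwy".toList then acc + 2 * p.2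
      else acc + 3 * p.2)
      = (fun acc p => acc + ((p.2 : Int) * pvWgt p.1)) := by
    funext acc p
    have e1 : "abdeginorstu".toList = ['a','b','d','e','g','i','n','o','r','s','t','u'] := by decide
    have e2 : "cfhlmpvwy".toList = ['c','f','h','l','m','p','v','w','y'] := by decide
    rw [e1, e2]
    unfold pvWgt
    split_ifs <;> ring
  rw [hstep2, PySem.List.foldl_add, List.map_map]
  have hbase : (List.map ((fun p => (p.2 : Int) * pvWgt p.1) ∘ fun k => (k, (cs.count k : Int))) (PySem.Set.ofList cs)).sum
      = (cs.map pvWgt).sum := by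
    rw [show ((fun (p : Char × Int) => (p.2 : Int) * pvWgt p.1) ∘ fun k => (k, (cs.count k : Int)))
        = (fun k => (cs.count k : Int) * pvWgt k) from rfl]
    exact pv_count_sum (PySem.Set.ofList cs) (PySem.Set.nodup_ofList cs) cs
      (fun c hc => (PySem.Set.mem_ofList cs c).mpr hc)
  rw [hbase]
  have hq : (PySem.List.pyRange 0 (cs.length : Int) 1).countP
      (fun i => decide (PySem.List.pyGetD cs i ' ' = 'u' ∧ PySem.List.pyGetD cs (i-1) ' ' = 'q'))
      = (PySem.List.pyRange 0 (cs.length : Int) 1).countP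
      (fun i => decide (PySem.List.pyGetD cs (i-1) ' ' = 'q' ∧ PySem.List.pyGetD cs i ' ' = 'u')) := by
    apply List.countP_congr
    intro x _
    simp [and_comm]
  rw [hq]; ring
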